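-- pv_equiv track=rewrite | github.com/libbyyosef/PuzzleSolver | puzzle_solver.py | helper_col_max_seen
-- ===== SOURCE A (Python) =====
-- from typing import List, Tuple, Set, Optional
--
-- Picture = List[List[int]]
--
-- def helper_col_max_seen(row: int, picture: Picture, col: int,
--                         color: int) -> int:
--     counter1_col: int = 0
--     counter2_col: int = 0
--     for c1 in range(col):
--         if color == 0:
--             if picture[row][c1] == color:
--                 counter1_col = 0
--             else:
--                 counter1_col += 1
--         else:
--             if picture[row][c1] == color:
--                 counter1_col += 1
--             else:
--                 counter1_col = 0
--     for c2 in range(col + 1, len(picture[0])):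
--         if color == 0:
--             if picture[row][c2] == color:
--                 return counter1_col + counter2_col
--             else:
--                 counter2_col += 1
--         else:
--             if picture[row][c2] == color:
--                 counter2_col += 1
--             else:
--                 return counter1_col + counter2_col
--     return counter1_col + counter2_col
-- ===== SOURCE B (Python) =====
-- def helper_col_max_seen(row, picture, col, color):
--     r = picture[row]
--     if color == 0:
--         match = lambda x: x != 0
--     else:
--         match = lambda x: x == color
--     left = 0
--     i = col - 1
--     while i >= 0 and match(r[i]):
--         left += 1
--         i -= 1
--     right = 0
--     n = len(r)
--     j = col + 1
--     while j < n and match(r[j]):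
--         right += 1
--         j += 1
--     return left + right
-- ===== Notes on version B (the rewrite author's own statement) =====
-- stated objective: simpler
-- what changed: Replaces A's full left-to-right accumulate-and-reset pass and its early-return forward loop by one match predicate and two symmetric early-terminating run scans (backward from col-1, forward from col+1) over the selected row.
-- outside the precondition, e.g. on helper_col_max_seen(1, [[1], [1, 1]], 0, 1): A returns 0, B returns 1
import Mathlib
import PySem

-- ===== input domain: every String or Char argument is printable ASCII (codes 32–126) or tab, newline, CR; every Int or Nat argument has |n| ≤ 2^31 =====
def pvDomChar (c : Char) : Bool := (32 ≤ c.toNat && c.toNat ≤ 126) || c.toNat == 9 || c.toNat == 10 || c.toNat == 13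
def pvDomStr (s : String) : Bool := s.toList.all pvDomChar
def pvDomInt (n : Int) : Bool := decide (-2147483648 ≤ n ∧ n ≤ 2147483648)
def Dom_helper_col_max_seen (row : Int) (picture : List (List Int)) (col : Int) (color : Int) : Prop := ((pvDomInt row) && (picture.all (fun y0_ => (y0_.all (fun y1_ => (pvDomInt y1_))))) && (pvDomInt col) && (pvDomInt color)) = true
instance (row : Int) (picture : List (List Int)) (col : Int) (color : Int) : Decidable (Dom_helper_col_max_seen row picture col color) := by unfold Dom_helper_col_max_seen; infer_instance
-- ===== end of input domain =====

-- B replaces A's full accumulate-and-reset left pass and early-return right loop by one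
-- match predicate and two symmetric early-terminating run scans around col (simpler).


-- ===== PORT A =====
-- A's second loop has an early return, transcribed as this recursion over the index list.
def pvLoop2A (color : Int) (r : List Int) (counter1 : Int) (counter2 : Int) : List Int → Int
  | [] => counter1 + counter2
  | c2 :: rest =>
    if color = 0 then
      if PySem.List.pyGetD r c2 0 = color then counter1 + counter2
      else pvLoop2A color r counter1 (counter2 + 1) rest
    else
      if PySem.List.pyGetD r c2 0 = color then pvLoop2A color r counter1 (counter2 + 1) rest
      else counter1 + counter2

def helper_col_max_seen (row : Int) (picture : List (List Int)) (col : Int) (color : Int) : Int :=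
  let rowL := PySem.List.pyGetD picture row []
  let counter1 := (PySem.List.pyRange 0 col 1).foldl (fun a c1 =>
    if color = 0 then (if PySem.List.pyGetD rowL c1 0 = color then 0 else a + 1)
    else (if PySem.List.pyGetD rowL c1 0 = color then a + 1 else 0)) 0
  pvLoop2A color rowL counter1 0
    (PySem.List.pyRange (col + 1) ((PySem.List.pyGetD picture 0 []).length) 1)

-- ===== PORT B =====
def pvMatch (color x : Int) : Bool := if color = 0 then x ≠ 0 else x = color

-- backward scan from index k-1 down, breaking at the first non-match
def pvLeft (color : Int) (r : List Int) : Nat → Int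
  | 0 => 0
  | k + 1 => if pvMatch color (r.getD k 0) then pvLeft color r k + 1 else 0

-- forward while loop: j from col+1 while j < n and match(r[j]); r[j] wraps Python-style
def pvRight (color : Int) (r : List Int) (n : Int) : Nat → Int → Int
  | 0, _ => 0
  | fuel + 1, j =>
    if j < n then
      if pvMatch color (PySem.List.pyGetD r j 0) then pvRight color r n fuel (j + 1) + 1 else 0
    else 0

def helper_col_max_seen_alt (row : Int) (picture : List (List Int)) (col : Int) (color : Int) : Int :=
  let r := PySem.List.pyGetD picture row []
  let n : Int := r.length
  pvLeft color r col.toNat + pvRight color r n (n - (col + 1)).toNat (col + 1)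

-- ===== PRECONDITION & SPEC =====
-- Pre_: picture nonempty and rectangular (width w), row a valid (possibly negative,
-- Python-wrapping) index, and -(w+1) <= col <= w.  It excludes exactly the inputs where A
-- raises IndexError and the ragged pictures, on which A's use of len(picture[0]) as the
-- scanned row's width is accidental.
def Pre_helper_col_max_seen (row : Int) (picture : List (List Int)) (col : Int) (color : Int) : Prop :=
  picture ≠ [] ∧ PySem.Raise.InRange picture.length row ∧
  -((picture.headD []).length + 1) ≤ col ∧ col ≤ (picture.headD []).length ∧
  ∀ r ∈ picture, r.length = (picture.headD []).length
instance (row : Int) (picture : List (List Int)) (col : Int) (color : Int) : Decidable (Pre_helper_col_max_seen row picture col color) := by unfold Pre_helper_col_max_seen; infer_instance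

def pvWitness_helper_col_max_seen : Int × List (List Int) × Int × Int := (0, [[1, 2, 2]], 1, 2)

def Spec_helper_col_max_seen (row : Int) (picture : List (List Int)) (col : Int) (color : Int) (out : Int) : Prop := out = helper_col_max_seen_alt row picture col color
instance (row : Int) (picture : List (List Int)) (col : Int) (color : Int) (out : Int) : Decidable (Spec_helper_col_max_seen row picture col color out) := by unfold Spec_helper_col_max_seen; infer_instance

-- ===== CLAIM (what is proved, stated in full; the proofs are below) =====
def Claim_equal_helper_col_max_seen : Prop := ∀ (row : Int) (picture : List (List Int)) (col : Int) (color : Int), Dom_helper_col_max_seen row picture col color → Pre_helper_col_max_seen row picture col color → Spec_helper_col_max_seen row picture col color (helper_col_max_seen row picture col color)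

-- ===== LEMMAS AND PROOFS =====

-- A's first loop over range(col) computes exactly B's backward run length.
theorem pvLeft_eq (color : Int) (r : List Int) (k : Nat) :
    (PySem.List.pyRange 0 (k : Int) 1).foldl (fun a c1 =>
      if color = 0 then (if PySem.List.pyGetD r c1 0 = color then 0 else a + 1)
      else (if PySem.List.pyGetD r c1 0 = color then a + 1 else 0)) 0
    = pvLeft color r k := by
  induction k with
  | zero => simp [PySem.List.pyRange_one_eq_nil, pvLeft]
  | succ k ih =>
    rw [show ((k + 1 : Nat) : Int) = (k : Int) + 1 by push_cast; ring,
        PySem.List.pyRange_one_succ_right (by positivity), List.foldl_append, ih]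
    simp only [List.foldl, pvLeft, PySem.List.pyGetD_natCast, pvMatch]
    by_cases h0 : color = 0 <;> by_cases hm : r.getD k 0 = color <;>
      simp [h0, hm] <;> omega

-- A's second loop with early return equals counter1 + counter2 + B's forward while scan.
theorem pvRight_eq (color : Int) (r : List Int) (n : Int) (fuel : Nat) :
    ∀ (j c1 c2 : Int), (n - j).toNat ≤ fuel →
    pvLoop2A color r c1 c2 (PySem.List.pyRange j n 1)
      = c1 + c2 + pvRight color r n fuel j := by
  induction fuel with
  | zero =>
    intro j c1 c2 hj
    rw [PySem.List.pyRange_one_eq_nil (by omega)]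
    simp [pvLoop2A, pvRight]
  | succ fuel ih =>
    intro j c1 c2 hj
    by_cases hjn : j < n
    · rw [PySem.List.pyRange_one_cons hjn]
      have ihj := ih (j + 1) c1 (c2 + 1) (by omega)
      by_cases h0 : color = 0
      · subst h0
        by_cases hm : PySem.List.pyGetD r j 0 = 0
        · simp [pvLoop2A, pvRight, pvMatch, hjn, hm]
        · simp [pvLoop2A, pvRight, pvMatch, hjn, hm, ihj]; omega
      · by_cases hm : PySem.List.pyGetD r j 0 = color
        · simp [pvLoop2A, pvRight, pvMatch, h0, hjn, hm, ihj]; omega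
        · simp [pvLoop2A, pvRight, pvMatch, h0, hjn, hm]
    · rw [PySem.List.pyRange_one_eq_nil (by omega)]
      simp [pvLoop2A, pvRight, hjn]

-- ===== VERDICT (by name: the statement is the Claim_ definition above) =====
theorem helper_col_max_seen_spec : Claim_equal_helper_col_max_seen := by
  intro row picture col color _ hpre
  obtain ⟨hne, hrin, hcl, hcu, hrect⟩ := hpre
  unfold Spec_helper_col_max_seen helper_col_max_seen helper_col_max_seen_alt
  cases picture with
  | nil => exact absurd rfl hne
  | cons h t =>
    have h0 : PySem.List.pyGetD (h :: t) 0 [] = h := by simp [PySem.List.pyGetD_zero_cons]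
    set r := PySem.List.pyGetD (h :: t) row [] with hrdef
    have hmem : r ∈ h :: t := PySem.List.pyGetD_mem _ _ hrin
    have hwidth : h.length = r.length := by
      have := hrect r hmem
      simp only [List.headD_cons] at this
      omega
    have hleft : (PySem.List.pyRange 0 col 1).foldl (fun a c1 =>
        if color = 0 then (if PySem.List.pyGetD r c1 0 = color then 0 else a + 1)
        else (if PySem.List.pyGetD r c1 0 = color then a + 1 else 0)) 0
        = pvLeft color r col.toNat := by
      by_cases hc : 0 ≤ col
      · rw [show col = ((col.toNat : Nat) : Int) by omega]
        rw [pvLeft_eq color r col.toNat]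
        simp only [Int.toNat_natCast]
      · rw [PySem.List.pyRange_one_eq_nil (by omega),
            show col.toNat = 0 by omega]
        simp [pvLeft]
    simp only [h0, hwidth, hleft]
    rw [pvRight_eq color r (r.length : Int) ((r.length : Int) - (col + 1)).toNat (col + 1) _ 0
        (le_refl _)]
    omega
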